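-- pv_equiv track=rewrite | github.com/MrFromer/algorithms_and_structures | Contest_1_10.py | solve
-- ===== SOURCE A (Python) =====
-- def solve(t, queries):
--     results = []
--     for n, m in queries:
--         total_sum = n * m * (n * m + 1) // 2
--         half_sum = total_sum // 2
--
--         # Вертикальный разрез
--         vertical_cut = (m * (m + 1)) // 2
--         if vertical_cut >= half_sum:
--             left, right = 1, m
--             while left < right:
--                 mid = (left + right) // 2
--                 if (mid * (mid + 1) // 2) < half_sum:
--                     left = mid + 1
--                 else:
--                     right = mid
--             results.append(f"V {left}")
--             continue
--
--         # Горизонтальный разрез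
--         horizontal_cut = (n * (2 * m + (n - 1) * m)) // 2
--         left, right = 1, n
--         while left < right:
--             mid = (left + right) // 2
--             if (mid * m * (mid * m + 1)) // 2 < half_sum:
--                 left = mid + 1
--             else:
--                 right = mid
--         results.append(f"H {left}")
--
--     return results
-- ===== SOURCE B (Python) =====
-- def _isqrt(n):
--     # floor square root of a nonnegative int, by the classic digit-pair recursion
--     if n < 2:
--         return n
--     r = _isqrt(n >> 2) << 1
--     return r + 1 if (r + 1) * (r + 1) <= n else r
--
--
-- def _least_tri(h):
--     # least k >= 1 with k*(k+1)//2 >= h, in closed form via an integer sqrt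
--     if h <= 1:
--         return 1
--     s = _isqrt(8 * h + 1)
--     k = (s - 1) // 2
--     return k if k * (k + 1) >= 2 * h else k + 1
--
--
-- def solve(t, queries):
--     results = []
--     for n, m in queries:
--         cells = n * m
--         half_sum = (cells * (cells + 1) // 2) // 2
--         if m * (m + 1) // 2 >= half_sum:
--             cut = _least_tri(half_sum)
--             results.append(f"V {max(1, min(cut, m))}")
--         else:
--             rows = -(-_least_tri(half_sum) // m)  # ceil: rows needed to reach half_sum
--             results.append(f"H {max(1, min(rows, n))}")
--     return results
-- ===== Notes on version B (the rewrite author's own statement) =====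
-- stated objective: alternative
-- what changed: Each per-query binary search is replaced by a closed-form computation (a recursive integer square root gives the least k with k*(k+1)/2 >= half_sum, then a ceiling division and a clamp into the valid range yield the cut); Pre_ excludes queries with a negative width m that take the horizontal branch, a meaningless grid on which A's binary-search bound and B's clamped ceiling division are both accidental values.
-- outside the precondition, e.g. on solve(0, [(2, -2)]): A returns ['H 2'], B returns ['H 1']
import Mathlib
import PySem

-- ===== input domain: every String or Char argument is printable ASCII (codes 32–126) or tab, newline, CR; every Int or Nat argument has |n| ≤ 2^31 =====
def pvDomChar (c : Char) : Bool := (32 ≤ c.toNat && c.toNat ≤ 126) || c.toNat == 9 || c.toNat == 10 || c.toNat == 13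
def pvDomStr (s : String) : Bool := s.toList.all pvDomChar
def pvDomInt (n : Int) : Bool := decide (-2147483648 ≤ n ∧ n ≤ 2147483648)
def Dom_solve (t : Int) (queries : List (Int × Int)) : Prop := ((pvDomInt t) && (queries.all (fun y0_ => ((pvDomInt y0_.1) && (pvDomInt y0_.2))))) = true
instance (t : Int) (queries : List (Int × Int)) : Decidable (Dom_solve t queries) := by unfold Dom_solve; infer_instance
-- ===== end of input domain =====

-- B replaces A's per-query binary search by a closed-form cut position via a recursive
-- integer square root (objective: alternative algorithm, similar cost).

-- ===== PORT A =====
-- Both while-loops of A have this exact shape (mid = (left+right)//2; 'too small' moves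
-- left to mid+1, else right to mid); p is the loop's comparison against half_sum.
def pyBisect (p : Int → Bool) (left right : Int) : Int :=
  if h : left < right then
    let mid := PySem.Int.floordiv (left + right) 2
    if p mid then pyBisect p (mid + 1) right else pyBisect p left mid
  else left
termination_by (right - left).toNat
decreasing_by
  · have h1 := (PySem.Int.floordiv_two_mid_bounds (le_of_lt h)).1
    omega
  · have h2 : PySem.Int.floordiv (left + right) 2 < right :=
      (PySem.Int.floordiv_lt_iff_lt_mul (by norm_num)).mpr (by omega)
    omega

-- the body of A's 'for n, m in queries' loop (results is the fold state)
def stepA (results : List String) (q : Int × Int) : List String :=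
  let n := q.1
  let m := q.2
  let total_sum := PySem.Int.floordiv (n * m * (n * m + 1)) 2
  let half_sum := PySem.Int.floordiv total_sum 2
  let vertical_cut := PySem.Int.floordiv (m * (m + 1)) 2
  if vertical_cut ≥ half_sum then
    let left := pyBisect (fun mid => decide (PySem.Int.floordiv (mid * (mid + 1)) 2 < half_sum)) 1 m
    results ++ ["V " ++ PySem.Int.toStr left]
  else
    let _horizontal_cut := PySem.Int.floordiv (n * (2 * m + (n - 1) * m)) 2
    let left := pyBisect (fun mid => decide (PySem.Int.floordiv (mid * m * (mid * m + 1)) 2 < half_sum)) 1 n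
    results ++ ["H " ++ PySem.Int.toStr left]

def solve (t : Int) (queries : List (Int × Int)) : List String :=
  queries.foldl stepA []

-- ===== PORT B =====
-- Source B's _isqrt; Python's `n >> 2` / `r << 1` on the nonnegative arguments B passes are
-- exactly Nat division / multiplication by powers of two (port exact on n ≥ 0).
def isqrtRec (n : Nat) : Nat :=
  if n < 2 then n
  else
    let r := isqrtRec (n / 4) * 2
    if (r + 1) * (r + 1) ≤ n then r + 1 else r
termination_by n
decreasing_by exact Nat.div_lt_self (by omega) (by omega)

-- Source B's _least_tri: least k ≥ 1 with k*(k+1)//2 ≥ h (h ≥ 0 whenever B calls it)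
def leastTri (h : Int) : Int :=
  if h ≤ 1 then 1
  else
    let s : Int := (isqrtRec (8 * h + 1).toNat : Int)
    let k := PySem.Int.floordiv (s - 1) 2
    if k * (k + 1) ≥ 2 * h then k else k + 1

-- the body of Source B's loop
def stepB (results : List String) (q : Int × Int) : List String :=
  let n := q.1
  let m := q.2
  let cells := n * m
  let half_sum := PySem.Int.floordiv (PySem.Int.floordiv (cells * (cells + 1)) 2) 2
  if PySem.Int.floordiv (m * (m + 1)) 2 ≥ half_sum then
    let cut := leastTri half_sum
    results ++ ["V " ++ PySem.Int.toStr (max 1 (min cut m))]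
  else
    let rows := -(PySem.Int.floordiv (-(leastTri half_sum)) m)
    results ++ ["H " ++ PySem.Int.toStr (max 1 (min rows n))]

def solve_alt (t : Int) (queries : List (Int × Int)) : List String :=
  queries.foldl stepB []

-- ===== PRECONDITION & SPEC =====
-- Pre_ excludes queries whose width m is negative and whose half_sum sends A to the
-- horizontal branch: a grid with a negative width is meaningless, and there A's
-- binary-search bound and B's clamped ceiling division are both accidental values
-- (e.g. on (0, [(2, -2)]) A returns ["H 2"] and B returns ["H 1"]).
def Pre_solve (t : Int) (queries : List (Int × Int)) : Prop :=
  ∀ q ∈ queries,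
    ¬(q.2 < 0 ∧ 2 ≤ q.1 ∧
      PySem.Int.floordiv (q.2 * (q.2 + 1)) 2 <
        PySem.Int.floordiv (PySem.Int.floordiv (q.1 * q.2 * (q.1 * q.2 + 1)) 2) 2)
instance (t : Int) (queries : List (Int × Int)) : Decidable (Pre_solve t queries) := by
  unfold Pre_solve; infer_instance

def pvWitness_solve : Int × (List (Int × Int)) := (0, [(3, 3), (2, 2), (4, 1)])

def Spec_solve (t : Int) (queries : List (Int × Int)) (out : List String) : Prop := out = solve_alt t queries
instance (t : Int) (queries : List (Int × Int)) (out : List String) : Decidable (Spec_solve t queries out) := by unfold Spec_solve; infer_instance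

-- ===== CLAIM (what is proved, stated in full; the proofs are below) =====
def Claim_equal_solve : Prop := ∀ (t : Int) (queries : List (Int × Int)), Dom_solve t queries → Pre_solve t queries → Spec_solve t queries (solve t queries)

-- ===== LEMMAS AND PROOFS =====

theorem tri_mono {i j : Int} (h0 : 0 ≤ i) (hij : i ≤ j) : i * (i + 1) ≤ j * (j + 1) := by
  nlinarith

theorem isqrtRec_eq (n : Nat) : isqrtRec n = Nat.sqrt n := by
  induction n using Nat.strong_induction_on with
  | _ n ih =>
    rw [isqrtRec]
    split
    · rename_i hlt
      interval_cases n <;> rfl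
    · rename_i hge
      have h2 : 2 ≤ n := by omega
      have ihn := ih (n / 4) (Nat.div_lt_self (by omega) (by omega))
      simp only [ihn]
      set s := Nat.sqrt (n / 4) with hs
      have hs1 : s ^ 2 ≤ n / 4 := Nat.sqrt_le' (n / 4)
      have hs2 : n / 4 < (s + 1) ^ 2 := Nat.lt_succ_sqrt' (n / 4)
      have hd : 4 * (n / 4) ≤ n ∧ n < 4 * (n / 4) + 4 := by omega
      have hlo : s * 2 ≤ Nat.sqrt n := by
        rw [Nat.le_sqrt']; nlinarith [hs1, hd.1]
      have hhi : Nat.sqrt n < s * 2 + 2 := by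
        rw [Nat.sqrt_lt']; nlinarith [hs2, hd.2]
      split
      · rename_i hle
        have : s * 2 + 1 ≤ Nat.sqrt n := by rw [Nat.le_sqrt']; nlinarith [hle]
        omega
      · rename_i hnle
        have : Nat.sqrt n < s * 2 + 1 := by rw [Nat.sqrt_lt']; nlinarith [hnle]
        omega

-- B's closed form picks the least k ≥ 1 with k*(k+1) ≥ 2h, as these three facts state
theorem leastTri_spec (h : Int) :
    1 ≤ leastTri h ∧ 2 * h ≤ leastTri h * (leastTri h + 1) ∧
      (2 ≤ leastTri h → (leastTri h - 1) * leastTri h < 2 * h) := by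
  unfold leastTri
  split
  · rename_i h1
    refine ⟨le_refl 1, by omega, by omega⟩
  · rename_i h1
    have hh : 2 ≤ h := by omega
    simp only [isqrtRec_eq]
    have hNN : ((8 * h + 1).toNat : Int) = 8 * h + 1 := Int.toNat_of_nonneg (by omega)
    set N := (8 * h + 1).toNat with hN
    set s : Int := (Nat.sqrt N : Int) with hs
    have hA : s * s ≤ 8 * h + 1 := by
      have h0 := Nat.sqrt_le' N
      have h0' : ((Nat.sqrt N ^ 2 : Nat) : Int) ≤ (N : Int) := by exact_mod_cast h0
      push_cast at h0'; nlinarith [h0']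
    have hB : 8 * h + 1 < (s + 1) * (s + 1) := by
      have h0 := Nat.lt_succ_sqrt' N
      have h0' : (N : Int) < ((Nat.sqrt N).succ ^ 2 : Nat) := by exact_mod_cast h0
      push_cast at h0'; nlinarith [h0']
    have hs4 : 4 ≤ s := by
      by_contra hc
      have hc' : s ≤ 3 := by omega
      have hs0 : 0 ≤ s := by positivity
      nlinarith
    set k := PySem.Int.floordiv (s - 1) 2 with hk
    have e := PySem.Int.floordiv_mul_add_mod (s - 1) 2
    have m1 := PySem.Int.mod_nonneg (s - 1) (b := 2) (by norm_num)
    have m2 := PySem.Int.mod_lt (s - 1) (b := 2) (by norm_num)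
    have hbr : 2 * k ≤ s - 1 ∧ s - 1 ≤ 2 * k + 1 := by
      constructor <;> omega
    have hk1 : 1 ≤ k := by omega
    split
    · rename_i hge
      refine ⟨hk1, hge, fun _ => ?_⟩
      nlinarith [hbr.1, hbr.2, hA, hs4]
    · rename_i hlt
      rw [ge_iff_le, not_le] at hlt
      refine ⟨by omega, ?_, fun _ => by nlinarith [hlt]⟩
      nlinarith [hbr.1, hbr.2, hB, hs4]

theorem leastTri_pos (h : Int) : 1 ≤ leastTri h := (leastTri_spec h).1

theorem leastTri_ge (h : Int) : 2 * h ≤ leastTri h * (leastTri h + 1) := (leastTri_spec h).2.1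

theorem leastTri_least (h j : Int) (h1 : 1 ≤ j) (h2 : j < leastTri h) : j * (j + 1) < 2 * h := by
  obtain ⟨hp, _, h3⟩ := leastTri_spec h
  have hK2 : 2 ≤ leastTri h := by omega
  have hm := tri_mono (i := j) (j := leastTri h - 1) (by omega) (by omega)
  have he : (leastTri h - 1) * (leastTri h - 1 + 1) = (leastTri h - 1) * leastTri h := by ring
  have := h3 hK2
  linarith [hm, he ▸ hm]

-- A's binary search returns k when everything left of k satisfies p and k itself fails it
theorem pyBisect_eq (p : Int → Bool) (N : Nat) : ∀ l r k : Int, (r - l).toNat ≤ N →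
    l ≤ k → k ≤ r →
    (∀ i j, l ≤ i → i ≤ j → j < r → p j = true → p i = true) →
    (∀ j, l ≤ j → j < k → p j = true) → (k < r → p k = false) →
    pyBisect p l r = k := by
  induction N with
  | zero =>
    intro l r k hN hlk hkr _ _ _
    rw [pyBisect, dif_neg (by omega)]
    omega
  | succ N ih =>
    intro l r k hN hlk hkr hmono hlow hhigh
    rw [pyBisect]
    by_cases hlr : l < r
    · rw [dif_pos hlr]
      have hb1 := (PySem.Int.floordiv_two_mid_bounds (le_of_lt hlr)).1
      have hb2 : PySem.Int.floordiv (l + r) 2 < r :=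
        (PySem.Int.floordiv_lt_iff_lt_mul (by norm_num)).mpr (by omega)
      set mid := PySem.Int.floordiv (l + r) 2 with hmid
      cases hpm : p mid with
      | true =>
        simp only [hpm, if_true]
        have hmk : mid < k := by
          by_contra hc
          have hkm : k ≤ mid := by omega
          have hf : p k = false := hhigh (by omega)
          have ht : p k = true := hmono k mid hlk hkm hb2 hpm
          simp_all
        exact ih (mid + 1) r k (by omega) (by omega) hkr
          (fun i j hi hij hj hp => hmono i j (by omega) hij hj hp)
          (fun j hj hjk => hlow j (by omega) hjk) hhigh
      | false =>
        simp only [hpm]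
        have hkm : k ≤ mid := by
          by_contra hc
          have ht : p mid = true := hlow mid (by omega) (by omega)
          simp_all
        exact ih l mid k (by omega) hlk hkm
          (fun i j hi hij hj hp => hmono i j hi hij (by omega) hp)
          hlow (fun hkm' => hhigh (by omega))
    · rw [dif_neg hlr]
      omega

-- A's search over [1, r] clamps the unconstrained least solution k into [1, r]
theorem pyBisect_clamp (p : Int → Bool) (r k : Int) (hk : 1 ≤ k)
    (hmono : ∀ i j, 1 ≤ i → i ≤ j → p j = true → p i = true)
    (hlow : ∀ j, 1 ≤ j → j < k → p j = true) (hfalse : p k = false) :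
    pyBisect p 1 r = max 1 (min k r) := by
  by_cases hr : 1 < r
  · have hmm : max 1 (min k r) = min k r := by omega
    rw [hmm]
    apply pyBisect_eq p (r - 1).toNat 1 r (min k r) (by omega) (by omega) (by omega)
    · exact fun i j hi hij _ hp => hmono i j hi hij hp
    · exact fun j hj hjk => hlow j hj (by omega)
    · intro hlt
      have hmk : min k r = k := by omega
      rw [hmk]; exact hfalse
  · rw [pyBisect, dif_neg hr]
    omega

theorem fd2_mono {a b : Int} (hab : a ≤ b) :
    PySem.Int.floordiv a 2 ≤ PySem.Int.floordiv b 2 := by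
  rw [PySem.Int.floordiv_eq_ediv_of_pos (by norm_num),
      PySem.Int.floordiv_eq_ediv_of_pos (by norm_num)]
  exact Int.ediv_le_ediv (by norm_num) hab

-- A's loop body equals B's on every query Pre_ admits
theorem step_eq (results : List String) (q : Int × Int)
    (hq : ¬(q.2 < 0 ∧ 2 ≤ q.1 ∧
      PySem.Int.floordiv (q.2 * (q.2 + 1)) 2 <
        PySem.Int.floordiv (PySem.Int.floordiv (q.1 * q.2 * (q.1 * q.2 + 1)) 2) 2)) :
    stepA results q = stepB results q := by
  obtain ⟨n, m⟩ := q
  simp only [stepA, stepB]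
  set half := PySem.Int.floordiv (PySem.Int.floordiv (n * m * (n * m + 1)) 2) 2 with hhalf
  by_cases hg : PySem.Int.floordiv (m * (m + 1)) 2 ≥ half
  · rw [if_pos hg, if_pos hg]
    have hb : pyBisect (fun mid => decide (PySem.Int.floordiv (mid * (mid + 1)) 2 < half)) 1 m
        = max 1 (min (leastTri half) m) := by
      apply pyBisect_clamp
      · exact leastTri_pos half
      · intro i j hi hij hp
        simp only [decide_eq_true_eq] at hp ⊢
        have := fd2_mono (tri_mono (by omega : (0:Int) ≤ i) hij)
        omega
      · intro j hj hjk
        simp only [decide_eq_true_eq]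
        exact (PySem.Int.floordiv_lt_iff_lt_mul (by norm_num)).mpr
          (by linarith [leastTri_least half j hj hjk])
      · simp only [decide_eq_false_iff_not, not_lt]
        exact (PySem.Int.le_floordiv_iff_mul_le (by norm_num)).mpr
          (by linarith [leastTri_ge half])
    rw [hb]
  · rw [if_neg hg, if_neg hg]
    rw [ge_iff_le, not_le] at hg
    have hmm0 : 0 ≤ PySem.Int.floordiv (m * (m + 1)) 2 := by
      rw [PySem.Int.floordiv_eq_ediv_of_pos (by norm_num)]
      exact Int.ediv_nonneg (by nlinarith [sq_nonneg (2 * m + 1)]) (by norm_num)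
    have hhalf1 : 1 ≤ half := by omega
    have hm0 : m ≠ 0 := by
      intro he
      rw [hhalf, he] at hhalf1
      have hz : n * 0 * (n * 0 + 1) = 0 := by ring
      rw [hz] at hhalf1
      have h02 : PySem.Int.floordiv 0 2 = 0 := by
        rw [PySem.Int.floordiv_eq_ediv_of_pos (by norm_num)]; simp
      rw [h02, h02] at hhalf1
      omega
    set x := leastTri half with hx
    have hx1 : 1 ≤ x := leastTri_pos half
    have hx2 : 2 * half ≤ x * (x + 1) := leastTri_ge half
    rcases lt_trichotomy m 0 with hm | hm | hm
    · -- m < 0: Pre_ leaves only n ≤ 1, where both sides return 1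
      have hn1 : n ≤ 1 := by
        by_contra hc
        exact hq ⟨hm, by omega, by omega⟩
      have hA : pyBisect (fun mid => decide (PySem.Int.floordiv (mid * m * (mid * m + 1)) 2 < half)) 1 n = 1 := by
        rw [pyBisect, dif_neg (by omega)]
      have hB : max 1 (min (-(PySem.Int.floordiv (-x) m)) n) = 1 := by
        have h1 : min (-(PySem.Int.floordiv (-x) m)) n ≤ n := min_le_right _ _
        omega
      rw [hA, hB]
    · exact absurd hm hm0
    · -- 0 < m
      set kH := -PySem.Int.floordiv (-x) m with hkH
      have hbr := (PySem.Int.neg_floordiv_neg_eq_iff_of_pos (a := x) (b := m) hm).mp rfl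
      rw [← hkH] at hbr
      have hkH1 : 1 ≤ kH := by nlinarith [hbr.2]
      have hb : pyBisect (fun mid => decide (PySem.Int.floordiv (mid * m * (mid * m + 1)) 2 < half)) 1 n
          = max 1 (min kH n) := by
        apply pyBisect_clamp
        · exact hkH1
        · intro i j hi hij hp
          simp only [decide_eq_true_eq] at hp ⊢
          have f1 : i * m ≤ j * m := by nlinarith
          have f2 : 0 ≤ i * m := by nlinarith
          have := fd2_mono (tri_mono f2 f1)
          omega
        · intro j hj hjk
          simp only [decide_eq_true_eq]
          apply (PySem.Int.floordiv_lt_iff_lt_mul (by norm_num)).mpr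
          have hj1 : 1 ≤ j * m := by nlinarith
          have hjx : j * m < x := by nlinarith [hbr.1]
          linarith [leastTri_least half (j * m) hj1 hjx]
        · simp only [decide_eq_false_iff_not, not_lt]
          apply (PySem.Int.le_floordiv_iff_mul_le (by norm_num)).mpr
          have := tri_mono (i := x) (j := kH * m) (by omega) hbr.2
          nlinarith [this]
      rw [hb]

-- ===== VERDICT (by name: the statement is the Claim_ definition above) =====
theorem solve_spec : Claim_equal_solve := by
  intro t queries _ hpre
  unfold Spec_solve solve solve_alt
  exact List.foldl_ext _ _ _ (fun acc q hq => step_eq acc q (hpre q hq))
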